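-- pv_equiv track=rewrite | github.com/dnanexus/dxCompiler | dxcint/dxcint/utils.py | rm_prefix
-- ===== SOURCE A (Python) =====
-- def rm_prefix(original_string: str, prefix: str) -> str:
--     if not original_string:
--         return ""
--     if not prefix:
--         return original_string
--     if original_string[0] == prefix[0]:
--         return rm_prefix(original_string[1:], prefix[1:])
--     else:
--         raise ValueError("rm_suffix(): prefix is not present in the original string")
-- ===== SOURCE B (Python) =====
-- def rm_prefix(original_string: str, prefix: str) -> str:
--     i = 0
--     while i < len(original_string) and i < len(prefix):
--         if original_string[i] != prefix[i]:
--             raise ValueError("rm_suffix(): prefix is not present in the original string")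
--         i += 1
--     return original_string[i:]
-- ===== Notes on version B (the rewrite author's own statement) =====
-- stated objective: faster
-- what changed: Replaced recursion over successive slices (each step building two new slice strings) with a single iterative index loop that compares characters in place and takes one final slice.
import Mathlib
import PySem

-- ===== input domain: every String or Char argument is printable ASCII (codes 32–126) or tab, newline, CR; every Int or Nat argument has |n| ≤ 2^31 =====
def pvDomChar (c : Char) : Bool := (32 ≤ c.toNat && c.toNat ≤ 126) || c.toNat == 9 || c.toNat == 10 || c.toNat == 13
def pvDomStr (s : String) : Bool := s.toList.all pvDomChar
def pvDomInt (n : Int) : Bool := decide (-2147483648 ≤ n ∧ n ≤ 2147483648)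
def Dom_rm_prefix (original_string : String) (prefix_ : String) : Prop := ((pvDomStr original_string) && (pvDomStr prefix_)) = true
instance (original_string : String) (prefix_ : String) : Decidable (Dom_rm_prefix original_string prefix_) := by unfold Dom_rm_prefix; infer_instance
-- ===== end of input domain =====

-- B replaces A's recursion-over-slices with a single iterative index loop and one final slice (same raising behaviour); equivalence is proved on Pre_, the inputs where A returns.

-- ===== PORT A =====
-- structural recursion on the two strings' character lists, mirroring A's
-- `s[0]` / `s[1:]` steps; the `raise ValueError` branch is excluded by Pre_
-- and returns [] in the port.
def rmPrefixRecA : List Char → List Char → List Char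
  | [], _ => []
  | o, [] => o
  | a :: o, b :: p => if a = b then rmPrefixRecA o p else []

def rm_prefix (original_string : String) (prefix_ : String) : String :=
  String.ofList (rmPrefixRecA original_string.toList prefix_.toList)

-- ===== PORT B =====
-- the while-loop of Source B: index i, compare in place, final slice o[i:]
-- (i is a Nat loop counter; 0 ≤ i ≤ len, so `List.drop i` is exactly o[i:]).
def rmPrefixLoopB (o p : List Char) (i : Nat) : List Char :=
  if h : i < o.length ∧ i < p.length then
    if o[i] = p[i] then rmPrefixLoopB o p (i + 1)
    else []  -- raise branch, excluded by Pre_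
  else
    o.drop i
termination_by o.length - i
decreasing_by omega

def rm_prefix_alt (original_string : String) (prefix_ : String) : String :=
  String.ofList (rmPrefixLoopB original_string.toList prefix_.toList 0)

-- ===== PRECONDITION & SPEC =====
-- Pre_ excludes exactly the inputs on which A raises ValueError: a character
-- mismatch within the common length of the two strings (B raises there too).
def Pre_rm_prefix (original_string : String) (prefix_ : String) : Prop :=
  (original_string.toList.zip prefix_.toList).all (fun ab => ab.1 = ab.2) = true
instance (original_string : String) (prefix_ : String) : Decidable (Pre_rm_prefix original_string prefix_) := by unfold Pre_rm_prefix; infer_instance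

def pvWitness_rm_prefix : String × String := ("hello world", "hello ")

def Spec_rm_prefix (original_string : String) (prefix_ : String) (out : String) : Prop := out = rm_prefix_alt original_string prefix_
instance (original_string : String) (prefix_ : String) (out : String) : Decidable (Spec_rm_prefix original_string prefix_ out) := by unfold Spec_rm_prefix; infer_instance

-- ===== CLAIM (what is proved, stated in full; the proofs are below) =====
def Claim_equal_rm_prefix : Prop := ∀ (original_string : String) (prefix_ : String), Dom_rm_prefix original_string prefix_ → Pre_rm_prefix original_string prefix_ → Spec_rm_prefix original_string prefix_ (rm_prefix original_string prefix_)

-- ===== LEMMAS AND PROOFS =====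

theorem rmPrefixRecA_nil_right (x : List Char) : rmPrefixRecA x [] = x := by
  cases x <;> rfl

theorem rmPrefixLoopB_eq (o p : List Char) (i : Nat)
    (h : ∀ j, i ≤ j → (hj1 : j < o.length) → (hj2 : j < p.length) → o[j] = p[j]) :
    rmPrefixLoopB o p i = rmPrefixRecA (o.drop i) (p.drop i) := by
  suffices H : ∀ n i, o.length - i ≤ n →
      (∀ j, i ≤ j → (hj1 : j < o.length) → (hj2 : j < p.length) → o[j] = p[j]) →
      rmPrefixLoopB o p i = rmPrefixRecA (o.drop i) (p.drop i) from H _ i le_rfl h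
  intro n
  induction n with
  | zero =>
    intro i hle _
    have ho : ¬ (i < o.length ∧ i < p.length) := by omega
    rw [rmPrefixLoopB, dif_neg ho]
    have : o.drop i = [] := List.drop_eq_nil_of_le (by omega)
    rw [this]
    rfl
  | succ n ih =>
    intro i hle hyp
    rw [rmPrefixLoopB]
    by_cases h1 : i < o.length ∧ i < p.length
    · obtain ⟨h1o, h1p⟩ := h1
      have heq : o[i] = p[i] := hyp i le_rfl h1o h1p
      rw [dif_pos ⟨h1o, h1p⟩, if_pos heq,
        ih (i + 1) (by omega) (fun j hj => hyp j (by omega))]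
      rw [List.drop_eq_getElem_cons h1o, List.drop_eq_getElem_cons h1p]
      simp [rmPrefixRecA, heq]
    · rw [dif_neg h1]
      rcases Nat.lt_or_ge i o.length with ho | ho
      · have hp : p.length ≤ i := by omega
        rw [List.drop_eq_nil_of_le hp, rmPrefixRecA_nil_right]
      · rw [List.drop_eq_nil_of_le ho]
        rfl

-- ===== VERDICT (by name: the statement is the Claim_ definition above) =====
theorem rm_prefix_spec : Claim_equal_rm_prefix := by
  intro o p _ hpre
  unfold Spec_rm_prefix rm_prefix rm_prefix_alt
  unfold Pre_rm_prefix at hpre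
  rw [List.all_eq_true] at hpre
  rw [rmPrefixLoopB_eq o.toList p.toList 0 ?_]
  · simp
  · intro j _ hj1 hj2
    have hj : j < (o.toList.zip p.toList).length := by rw [List.length_zip]; omega
    have := hpre _ (List.getElem_mem hj)
    simpa [List.getElem_zip] using this
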